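-- pv_equiv track=rewrite | github.com/ZrjaK/algorithm | OJ/leetcode/321.拼接最大数.py | maxNumber
-- ===== SOURCE A (Python) =====
-- from typing import List
--
-- def maxNumber(nums1: List[int], nums2: List[int], k: int) -> List[int]:
--     m, n = len(nums1), len(nums2)
--     res = []
--     def calc(arr, f):
--         q = []
--         c = len(arr)-f
--         for i in range(len(arr)):
--             while q and c and arr[q[-1]] < arr[i]:
--                 q.pop()
--                 c -= 1
--             q.append(i)
--         return [arr[i] for i in q][:f]
--     def merge(a, b):
--         i = j = 0
--         ans = []
--         while a and b:
--             if a > b: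
--                 ans.append(a[0])
--                 a = a[1:]
--             else:
--                 ans.append(b[0])
--                 b = b[1:]
--         ans += a + b
--         return ans
--     for i in range(k+1):
--         if i <= m and k-i <= n:
--             p1 = calc(nums1, i)
--             p2 = calc(nums2, k-i)
--             t = merge(p1, p2)
--             if t > res:
--                 res = t
--     return res
-- ===== SOURCE B (Python) =====
-- from typing import List
--
-- def maxNumber(nums1: List[int], nums2: List[int], k: int) -> List[int]:
--     m, n = len(nums1), len(nums2)
--
--     def pick(arr, f):
--         # greedy windowed selection: for each output position take the earliest
--         # maximum of the window that still leaves enough elements, then advance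
--         out = []
--         start = 0
--         for p in range(f):
--             end = len(arr) - (f - 1 - p)
--             best = start
--             for t in range(start + 1, end):
--                 if arr[t] > arr[best]:
--                     best = t
--             out.append(arr[best])
--             start = best + 1
--         return out
--
--     def greater(a, i, b, j):
--         # a[i:] > b[j:] lexicographically, without building slices
--         while i < len(a) and j < len(b):
--             if a[i] != b[j]:
--                 return a[i] > b[j]
--             i += 1
--             j += 1
--         return i < len(a)
--
--     def merge(a, b):
--         i = j = 0
--         out = []
--         while i < len(a) and j < len(b):
--             if greater(a, i, b, j):
--                 out.append(a[i])
--                 i += 1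
--             else:
--                 out.append(b[j])
--                 j += 1
--         return out + a[i:] + b[j:]
--
--     cands = [merge(pick(nums1, i), pick(nums2, k - i))
--              for i in range(k + 1) if i <= m and k - i <= n]
--     return max(cands, default=[])
-- ===== Notes on version B (the rewrite author's own statement) =====
-- stated objective: alternative
-- what changed: calc's monotonic stack with a pop budget is replaced by windowed greedy selection with a start pointer (for each output position, take the earliest maximum of the window that still leaves enough elements), merge is rewritten over two index pointers with an explicit lexicographic comparator instead of repeated list slicing, and the outer search becomes a comprehension reduced by max(..., default=[]).
import Mathlib
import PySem

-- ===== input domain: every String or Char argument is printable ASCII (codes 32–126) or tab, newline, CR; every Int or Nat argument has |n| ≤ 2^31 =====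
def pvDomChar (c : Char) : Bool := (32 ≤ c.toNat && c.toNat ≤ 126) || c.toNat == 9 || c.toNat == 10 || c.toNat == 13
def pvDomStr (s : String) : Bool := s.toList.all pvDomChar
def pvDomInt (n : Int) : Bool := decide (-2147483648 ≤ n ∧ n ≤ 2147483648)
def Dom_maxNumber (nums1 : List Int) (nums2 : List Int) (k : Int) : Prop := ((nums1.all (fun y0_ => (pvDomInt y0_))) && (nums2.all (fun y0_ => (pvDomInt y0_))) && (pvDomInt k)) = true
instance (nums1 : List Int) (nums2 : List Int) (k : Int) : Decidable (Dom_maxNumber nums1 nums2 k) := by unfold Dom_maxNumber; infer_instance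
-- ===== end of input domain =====

-- B replaces calc's monotonic stack with recursive windowed greedy selection and
-- merge's list slicing with two index pointers (objective: alternative algorithm, same results).

-- ===== PORT A =====

-- Python list comparison a > b (lexicographic, shorter list is smaller on a tie prefix)
def gtList : List Int → List Int → Bool
  | [], _ => false
  | _ :: _, [] => true
  | x :: a, y :: b => if x > y then true else if x < y then false else gtList a b

-- the inner `while q and c and arr[q[-1]] < arr[i]: q.pop(); c -= 1` loop.
-- The Python stack holds indices but only ever reads arr[q[-1]] and maps q through arr
-- at the end, so the port keeps the values arr[i] on the stack directly (same steps, same values).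
def popLoop (x : Int) : List Int → Int → List Int × Int
  | [], c => ([], c)
  | t :: r, c => if c ≠ 0 ∧ t < x then popLoop x r (c - 1) else (t :: r, c)

-- the `for i in range(len(arr))` loop of calc; stack kept top-first, reversed at the end
def runStack (arr : List Int) (s : List Int) (c : Int) : List Int × Int :=
  arr.foldl (fun sc x => let p := popLoop x sc.1 sc.2; (x :: p.1, p.2)) (s, c)

def calcA (arr : List Int) (f : Int) : List Int :=
  PySem.List.slice ((runStack arr [] ((arr.length : Int) - f)).1.reverse) none (some f)

def mergeA : List Int → List Int → List Int
  | [], b => b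
  | x :: a, [] => x :: a
  | x :: a, y :: b =>
      if gtList (x :: a) (y :: b) then x :: mergeA a (y :: b) else y :: mergeA (x :: a) b
termination_by a b => a.length + b.length

def maxNumber (nums1 : List Int) (nums2 : List Int) (k : Int) : List Int :=
  (PySem.List.pyRange 0 (k + 1) 1).foldl (fun res i =>
    if i ≤ (nums1.length : Int) ∧ k - i ≤ (nums2.length : Int) then
      let t := mergeA (calcA nums1 i) (calcA nums2 (k - i))
      if gtList t res then t else res
    else res) []

-- ===== PORT B =====

-- pick's loops: `for p in range(f)` carrying (start, out); inner scan
-- `for t in range(start + 1, end): if arr[t] > arr[best]: best = t`.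
-- All indices B ever uses are nonnegative and in range, so .toNat-getD indexing is exact here.
def bestFrom (arr : List Int) (start : Int) (endI : Int) : Int :=
  (PySem.List.pyRange (start + 1) endI 1).foldl
    (fun b t => if arr.getD b.toNat 0 < arr.getD t.toNat 0 then t else b) start

def pickB (arr : List Int) (f : Int) : List Int :=
  ((PySem.List.pyRange 0 f 1).foldl (fun st p =>
      let b := bestFrom arr st.1 ((arr.length : Int) - (f - 1 - p))
      (b + 1, st.2 ++ [arr.getD b.toNat 0])) ((0 : Int), ([] : List Int))).2

-- `greater(a, i, b, j)`: a[i:] > b[j:] via index pointers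
def greaterB (a : List Int) (i : Nat) (b : List Int) (j : Nat) : Bool :=
  if i < a.length ∧ j < b.length then
    if a.getD i 0 ≠ b.getD j 0 then decide (b.getD j 0 < a.getD i 0)
    else greaterB a (i + 1) b (j + 1)
  else decide (i < a.length)
termination_by a.length - i
decreasing_by omega

-- merge's while loop over the two pointers; out-accumulation becomes cons-recursion
def mergeGo (a : List Int) (b : List Int) (i : Nat) (j : Nat) : List Int :=
  if i < a.length ∧ j < b.length then
    if greaterB a i b j then a.getD i 0 :: mergeGo a b (i + 1) j
    else b.getD j 0 :: mergeGo a b i (j + 1)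
  else a.drop i ++ b.drop j
termination_by (a.length - i) + (b.length - j)
decreasing_by all_goals omega

def maxNumber_alt (nums1 : List Int) (nums2 : List Int) (k : Int) : List Int :=
  let cands := (PySem.List.pyRange 0 (k + 1) 1).filterMap (fun i =>
    if i ≤ (nums1.length : Int) ∧ k - i ≤ (nums2.length : Int) then
      some (mergeGo (pickB nums1 i) (pickB nums2 (k - i)) 0 0)
    else none)
  -- max(cands, default=[]): first element, then replace whenever a later one compares greater
  match cands with
  | [] => []
  | h :: t => t.foldl (fun r x => if gtList x r then x else r) h

-- ===== PRECONDITION & SPEC =====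
def Spec_maxNumber (nums1 : List Int) (nums2 : List Int) (k : Int) (out : List Int) : Prop := out = maxNumber_alt nums1 nums2 k
instance (nums1 : List Int) (nums2 : List Int) (k : Int) (out : List Int) : Decidable (Spec_maxNumber nums1 nums2 k out) := by unfold Spec_maxNumber; infer_instance

-- ===== CLAIM (what is proved, stated in full; the proofs are below) =====
def Claim_equal_maxNumber : Prop := ∀ (nums1 : List Int) (nums2 : List Int) (k : Int), Dom_maxNumber nums1 nums2 k → Spec_maxNumber nums1 nums2 k (maxNumber nums1 nums2 k)

-- ===== LEMMAS AND PROOFS =====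

-- first index of the maximum of arr[0..m] (proof-side restatement of the inner scan)
def bestIdx (arr : List Int) (m : Nat) : Nat :=
  (List.range' 1 m).foldl (fun b j => if arr.getD b 0 < arr.getD j 0 then j else b) 0

-- Nat-indexed version of pickB used by the proofs
def pickN (arr : List Int) : Nat → List Int
  | 0 => []
  | f + 1 =>
      let b := bestIdx arr (arr.length - (f + 1))
      arr.getD b 0 :: pickN (arr.drop (b + 1)) f

theorem popLoop_snd_sub (x : Int) (s : List Int) (c : Int) :
    (popLoop x s c).2 - (popLoop x s c).1.length = c - s.length := by
  induction s generalizing c with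
  | nil => simp [popLoop]
  | cons t r ih =>
      simp only [popLoop]
      split
      · rw [ih]; simp; ring
      · simp

theorem popLoop_nonneg (x : Int) (s : List Int) (c : Int) (hc : 0 ≤ c) :
    0 ≤ (popLoop x s c).2 := by
  induction s generalizing c with
  | nil => simpa [popLoop]
  | cons t r ih =>
      simp only [popLoop]
      split
      · exact ih _ (by omega)
      · simpa

theorem popLoop_mem (x : Int) (s : List Int) (c : Int) (e : Int)
    (he : e ∈ (popLoop x s c).1) : e ∈ s := by
  induction s generalizing c with
  | nil => simp [popLoop] at he
  | cons t r ih =>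
      simp only [popLoop] at he
      split at he
      · exact List.mem_cons_of_mem _ (ih _ he)
      · simpa using he

theorem runStack_nil (s : List Int) (c : Int) : runStack [] s c = (s, c) := rfl

theorem runStack_cons (arr : List Int) (x : Int) (s : List Int) (c : Int) :
    runStack (x :: arr) s c = runStack arr (x :: (popLoop x s c).1) (popLoop x s c).2 := by
  simp [runStack]

theorem runStack_append (l₁ l₂ : List Int) (s : List Int) (c : Int) :
    runStack (l₁ ++ l₂) s c = runStack l₂ (runStack l₁ s c).1 (runStack l₁ s c).2 := by
  simp [runStack, List.foldl_append]

theorem runStack_snd_sub (l : List Int) (s : List Int) (c : Int) :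
    (runStack l s c).2 - (runStack l s c).1.length = c - s.length - l.length := by
  induction l generalizing s c with
  | nil => simp [runStack]
  | cons x l ih =>
      rw [runStack_cons, ih]
      have := popLoop_snd_sub x s c
      simp at *; omega

theorem runStack_mem_lt (l : List Int) (s : List Int) (c : Int) (x : Int)
    (hl : ∀ e ∈ l, e < x) (hs : ∀ e ∈ s, e < x) :
    ∀ e ∈ (runStack l s c).1, e < x := by
  induction l generalizing s c with
  | nil => simpa [runStack]
  | cons y l ih =>
      rw [runStack_cons]
      refine ih _ _ (fun e he => hl e (by simp [he])) ?_
      intro e he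
      rcases List.mem_cons.mp he with h | h
      · exact h ▸ hl y (by simp)
      · exact hs e (popLoop_mem _ _ _ _ h)

theorem popLoop_all_lt (x : Int) (s : List Int) (c : Int)
    (hs : ∀ e ∈ s, e < x) (hc : (s.length : Int) ≤ c) :
    popLoop x s c = ([], c - s.length) := by
  induction s generalizing c with
  | nil => simp [popLoop]
  | cons t r ih =>
      have ht : t < x := hs t (by simp)
      have hlen : (r.length : Int) + 1 ≤ c := by simpa using hc
      simp only [popLoop]
      rw [if_pos ⟨by omega, ht⟩, ih (c - 1) (fun e he => hs e (List.mem_cons_of_mem _ he)) (by omega)]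
      simp
      ring

theorem popLoop_bottom (e x : Int) (s : List Int) (c : Int) (hc : 0 ≤ c)
    (h : c - s.length ≤ 0 ∨ e ≤ x) :
    popLoop e (s ++ [x]) c = ((popLoop e s c).1 ++ [x], (popLoop e s c).2) := by
  induction s generalizing c with
  | nil =>
      simp only [List.nil_append, popLoop]
      rw [if_neg]
      rintro ⟨hc0, hlt⟩
      rcases h with h | h
      · simp at h; omega
      · omega
  | cons t r ih =>
      simp only [List.cons_append, popLoop]
      split
      · rename_i hg
        apply ih (c - 1) (by omega)
        rcases h with h | h
        · left; simp at h ⊢; omega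
        · exact Or.inr h
      · rfl

theorem runStack_bottom (l : List Int) (s : List Int) (c : Int) (x : Int) (hc : 0 ≤ c)
    (h : ∀ i, i < l.length → (i : Int) < c - s.length → l.getD i 0 ≤ x) :
    runStack l (s ++ [x]) c = ((runStack l s c).1 ++ [x], (runStack l s c).2) := by
  induction l generalizing s c with
  | nil => simp [runStack]
  | cons e l ih =>
      have hp : popLoop e (s ++ [x]) c = ((popLoop e s c).1 ++ [x], (popLoop e s c).2) := by
        apply popLoop_bottom _ _ _ _ hc
        by_cases h0 : (0 : Int) < c - s.length
        · exact Or.inr (by simpa using h 0 (by simp) (by simpa using h0))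
        · exact Or.inl (by omega)
      rw [runStack_cons, hp]
      have : e :: ((popLoop e s c).1 ++ [x]) = (e :: (popLoop e s c).1) ++ [x] := by simp
      rw [this, ih _ _ (popLoop_nonneg _ _ _ hc)]
      · rw [runStack_cons]
      · intro i hi hlt
        have hps := popLoop_snd_sub e s c
        simp only [List.length_cons] at hlt
        have := h (i + 1) (by simpa using Nat.succ_lt_succ hi) (by push_cast at hlt hps ⊢; omega)
        simpa using this

theorem runStack_phase1 (P : List Int) (x : Int) (c : Int)
    (hP : ∀ e ∈ P, e < x) (hc : (P.length : Int) ≤ c) :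
    runStack (P ++ [x]) [] c = ([x], c - P.length) := by
  have h0c : 0 ≤ c := le_trans (by positivity) hc
  rw [runStack_append]
  have hall : ∀ e ∈ (runStack P [] c).1, e < x :=
    runStack_mem_lt P [] c x hP (by simp)
  have hlen : ((runStack P [] c).1.length : Int) ≤ (runStack P [] c).2 := by
    have := runStack_snd_sub P [] c
    simp at this; omega
  have hpop := popLoop_all_lt x (runStack P [] c).1 (runStack P [] c).2 hall hlen
  rw [runStack_cons, hpop, runStack_nil]
  have h2 := runStack_snd_sub P [] c
  simp at h2 ⊢
  omega

theorem bestIdx_spec (arr : List Int) (m : Nat) :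
    bestIdx arr m ≤ m ∧ (∀ u ≤ m, arr.getD u 0 ≤ arr.getD (bestIdx arr m) 0) ∧
      (∀ u < bestIdx arr m, arr.getD u 0 < arr.getD (bestIdx arr m) 0) := by
  induction m with
  | zero => simp [bestIdx]
  | succ m ih =>
      have hstep : bestIdx arr (m + 1) =
          (if arr.getD (bestIdx arr m) 0 < arr.getD (m + 1) 0 then m + 1 else bestIdx arr m) := by
        simp [bestIdx, List.range'_1_concat, List.foldl_append, Nat.add_comm]
      obtain ⟨hle, hmax, hstrict⟩ := ih
      rw [hstep]
      split
      · rename_i hlt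
        refine ⟨le_refl _, fun u hu => ?_, fun u hu => ?_⟩
        · rcases Nat.lt_succ_iff_lt_or_eq.mp (Nat.lt_succ_of_le hu) with h | h
          · exact le_of_lt (lt_of_le_of_lt (hmax u (Nat.lt_succ_iff.mp h)) hlt)
          · exact h ▸ le_refl _
        · exact lt_of_le_of_lt (hmax u (Nat.lt_succ_iff.mp hu)) hlt
      · rename_i hge
        refine ⟨Nat.le_succ_of_le hle, fun u hu => ?_, hstrict⟩
        rcases Nat.lt_succ_iff_lt_or_eq.mp (Nat.lt_succ_of_le hu) with h | h
        · exact hmax u (Nat.lt_succ_iff.mp h)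
        · rw [h]; omega

theorem stack_eq_pick (f : Nat) (arr : List Int) (hf : f ≤ arr.length) :
    ((runStack arr [] ((arr.length : Int) - f)).1.reverse.take f) = pickN arr f := by
  induction f generalizing arr with
  | zero => simp [pickN]
  | succ f ih =>
      set n := arr.length with hn
      set j := bestIdx arr (n - (f + 1)) with hj
      obtain ⟨hjle, hmax, hstrict⟩ := bestIdx_spec arr (n - (f + 1))
      have hjn : j ≤ n - (f + 1) := hjle
      have hjlt : j < n := by omega
      set x := arr.getD j 0 with hx
      have hsplit : arr = arr.take j ++ [x] ++ arr.drop (j + 1) := by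
        have h1 : arr.take (j + 1) = arr.take j ++ [x] := by
          rw [List.take_add_one]
          simp [List.getElem?_eq_getElem hjlt, hx]
        conv_lhs => rw [← List.take_append_drop (j + 1) arr, h1]
      have hc0 : ((arr.take j).length : Int) ≤ (n : Int) - (f + 1) := by
        simp [List.length_take]; omega
      have hph1 : runStack (arr.take j ++ [x]) [] ((n : Int) - (f + 1)) = ([x], (n : Int) - (f + 1) - j) := by
        rw [runStack_phase1 _ _ _ ?_ hc0]
        · simp [List.length_take]; omega
        · intro e he
          obtain ⟨i, hi, hei⟩ := List.mem_take_iff_getElem.mp he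
          have hij : i < j := by omega
          have : arr.getD i 0 < x := hstrict i hij
          rwa [List.getD_eq_getElem _ _ (by omega), hei] at this
      have hcj : (0 : Int) ≤ (n : Int) - (f + 1) - j := by
        have : (j : Int) ≤ (n : Int) - (f + 1) := by exact_mod_cast le_trans (Nat.cast_le.mpr hjn) (by push_cast; omega)
        omega
      have hbot : runStack (arr.drop (j + 1)) [x] ((n : Int) - (f + 1) - j) =
          ((runStack (arr.drop (j + 1)) [] ((n : Int) - (f + 1) - j)).1 ++ [x],
           (runStack (arr.drop (j + 1)) [] ((n : Int) - (f + 1) - j)).2) := by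
        have := runStack_bottom (arr.drop (j + 1)) [] ((n : Int) - (f + 1) - j) x hcj ?_
        · simpa using this
        · intro i hi hlt
          have hlen : (arr.drop (j + 1)).length = n - (j + 1) := by simp [hn]
          have hidx : j + 1 + i < n := by omega
          have hgd : (arr.drop (j + 1)).getD i 0 = arr.getD (j + 1 + i) 0 := by
            rw [List.getD_eq_getElem _ _ (by omega), List.getD_eq_getElem _ _ hidx]
            simp [List.getElem_drop]
          rw [hgd]
          apply hmax
          simp at hlt
          omega
      have hrun : runStack arr [] ((n : Int) - (f + 1)) =
          ((runStack (arr.drop (j + 1)) [] ((n : Int) - (f + 1) - j)).1 ++ [x],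
           (runStack (arr.drop (j + 1)) [] ((n : Int) - (f + 1) - j)).2) := by
        conv_lhs => rw [hsplit]
        rw [runStack_append, hph1]
        simpa using hbot
      have hfl : f ≤ (arr.drop (j + 1)).length := by simp; omega
      have hbudget : ((arr.drop (j + 1)).length : Int) - f = (n : Int) - (f + 1) - j := by
        simp; omega
      calc ((runStack arr [] ((arr.length : Int) - (f + 1))).1.reverse.take (f + 1))
          = x :: ((runStack (arr.drop (j + 1)) [] ((n : Int) - (f + 1) - j)).1.reverse.take f) := by
            rw [← hn]; rw [hrun]; simp
        _ = x :: pickN (arr.drop (j + 1)) f := by rw [← hbudget, ih _ hfl]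
        _ = pickN arr (f + 1) := by rw [pickN]

theorem getD_drop' (arr : List Int) (s j : Nat) (h : s + j < arr.length) :
    (arr.drop s).getD j 0 = arr.getD (s + j) 0 := by
  rw [List.getD_eq_getElem _ _ (by simp; omega), List.getD_eq_getElem _ _ h]
  simp

theorem bestFrom_shift (m : Nat) (arr : List Int) (s : Nat) (h : s + m < arr.length) :
    bestFrom arr (s : Int) ((s : Int) + (m : Int) + 1) = ((s + bestIdx (arr.drop s) m : Nat) : Int) := by
  induction m with
  | zero =>
      rw [bestFrom, PySem.List.pyRange_one_eq_nil (by omega)]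
      simp [bestIdx]
  | succ m ih =>
      have hsm : s + m < arr.length := by omega
      have hpeel : PySem.List.pyRange ((s : Int) + 1) ((s : Int) + (m + 1 : Nat) + 1) 1 =
          PySem.List.pyRange ((s : Int) + 1) ((s : Int) + (m : Nat) + 1) 1 ++ [(s : Int) + (m : Nat) + 1] := by
        have := PySem.List.pyRange_one_succ_right (a := (s : Int) + 1) (b := (s : Int) + (m : Nat) + 1) (by omega)
        push_cast at this ⊢
        rw [show (s : Int) + ((m : Int) + 1) + 1 = ((s : Int) + (m : Int) + 1) + 1 by ring, this]
      rw [bestFrom, hpeel, List.foldl_append]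
      rw [show (PySem.List.pyRange ((s : Int) + 1) ((s : Int) + (m : Nat) + 1) 1).foldl
            (fun b t => if arr.getD b.toNat 0 < arr.getD t.toNat 0 then t else b) (s : Int) =
          bestFrom arr (s : Int) ((s : Int) + (m : Nat) + 1) from rfl, ih hsm]
      have hj := (bestIdx_spec (arr.drop s) m).1
      have hbi : bestIdx (arr.drop s) (m + 1) =
          (if (arr.drop s).getD (bestIdx (arr.drop s) m) 0 < (arr.drop s).getD (m + 1) 0
            then m + 1 else bestIdx (arr.drop s) m) := by
        simp [bestIdx, List.range'_1_concat, List.foldl_append, Nat.add_comm]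
      rw [hbi]
      simp only [List.foldl_cons, List.foldl_nil]
      have h1 : ((s + bestIdx (arr.drop s) m : Nat) : Int).toNat = s + bestIdx (arr.drop s) m := by omega
      have h2 : ((s : Int) + (m : Nat) + 1).toNat = s + (m + 1) := by omega
      rw [h1, h2, getD_drop' arr s _ (by omega), getD_drop' arr s _ (by omega)]
      split
      · push_cast; ring
      · rfl

theorem pick_iter (r : Nat) (arr : List Int) (a f : Int) (s : Nat) (acc : List Int)
    (ha : 0 ≤ a) (hr : (f - a).toNat = r) (hrn : s + r ≤ arr.length) :
    ((PySem.List.pyRange a f 1).foldl (fun st p =>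
        let b := bestFrom arr st.1 ((arr.length : Int) - (f - 1 - p))
        (b + 1, st.2 ++ [arr.getD b.toNat 0])) (((s : Nat) : Int), acc)).2
      = acc ++ pickN (arr.drop s) r := by
  induction r generalizing a s acc with
  | zero =>
      rw [PySem.List.pyRange_one_eq_nil (by omega)]
      simp [pickN]
  | succ r ih =>
      have hfa : f - a = r + 1 := by omega
      rw [PySem.List.pyRange_one_cons (by omega)]
      simp only [List.foldl_cons]
      set m : Nat := arr.length - s - (r + 1) with hm
      have hEnd : (arr.length : Int) - (f - 1 - a) = (s : Int) + (m : Int) + 1 := by omega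
      have hsm : s + m < arr.length := by omega
      rw [hEnd, bestFrom_shift m arr s hsm]
      set j : Nat := bestIdx (arr.drop s) m with hjdef
      have hjm : j ≤ m := (bestIdx_spec (arr.drop s) m).1
      have h1 : ((s + j : Nat) : Int).toNat = s + j := by omega
      have h2 : ((s + j : Nat) : Int) + 1 = ((s + j + 1 : Nat) : Int) := by push_cast; ring
      rw [h1, h2, ih (a + 1) (s + j + 1) _ (by omega) (by omega) (by omega)]
      have hpick : pickN (arr.drop s) (r + 1) =
          (arr.drop s).getD (bestIdx (arr.drop s) ((arr.drop s).length - (r + 1))) 0 ::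
            pickN ((arr.drop s).drop (bestIdx (arr.drop s) ((arr.drop s).length - (r + 1)) + 1)) r := by
        rw [pickN]
      have hlen : (arr.drop s).length - (r + 1) = m := by simp [hm]
      rw [hpick, hlen, ← hjdef, List.drop_drop]
      rw [getD_drop' arr s j (by omega)]
      simp [Nat.add_assoc]

theorem pickB_eq_pickN (arr : List Int) (f : Int) (h0 : 0 ≤ f) (h1 : f ≤ (arr.length : Int)) :
    pickB arr f = pickN arr f.toNat := by
  have := pick_iter f.toNat arr 0 f 0 [] (by omega) (by omega) (by omega)
  simpa [pickB] using this

theorem calcA_eq_pickB (arr : List Int) (f : Int) (h0 : 0 ≤ f) (h1 : f ≤ (arr.length : Int)) :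
    calcA arr f = pickB arr f := by
  have hto : ((f.toNat : Int)) = f := Int.toNat_of_nonneg h0
  rw [calcA, PySem.List.slice_to _ h0, pickB_eq_pickN arr f h0 h1, ← hto]
  exact stack_eq_pick f.toNat arr (by omega)

theorem greaterB_eq (a : List Int) (i : Nat) (b : List Int) (j : Nat) :
    greaterB a i b j = gtList (a.drop i) (b.drop j) := by
  induction i, j using greaterB.induct a b with
  | case1 i j h hne =>
      rw [greaterB, if_pos h, if_pos hne]
      rw [List.drop_eq_getElem_cons h.1, List.drop_eq_getElem_cons h.2]
      rw [List.getD_eq_getElem a 0 h.1, List.getD_eq_getElem b 0 h.2] at hne ⊢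
      rcases lt_trichotomy (a[i]) (b[j]) with hlt | heq | hgt
      · simp [gtList, hlt, not_lt.mpr (le_of_lt hlt)]
      · exact absurd heq hne
      · simp [gtList, hgt]
  | case2 i j h hne ih =>
      rw [greaterB, if_pos h, if_neg hne, ih]
      rw [List.drop_eq_getElem_cons h.1, List.drop_eq_getElem_cons h.2]
      have heq : a[i] = b[j] := by
        rw [List.getD_eq_getElem a 0 h.1, List.getD_eq_getElem b 0 h.2] at hne
        simpa using hne
      simp [gtList, heq]
  | case3 i j h =>
      rw [greaterB, if_neg h]
      by_cases hi : i < a.length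
      · have hj : b.length ≤ j := by omega
        rw [List.drop_eq_nil_of_le hj, List.drop_eq_getElem_cons hi]
        simp [gtList, hi]
      · rw [List.drop_eq_nil_of_le (by omega)]
        simp [gtList, hi]

theorem mergeGo_eq (a : List Int) (b : List Int) (i : Nat) (j : Nat) :
    mergeGo a b i j = mergeA (a.drop i) (b.drop j) := by
  induction i, j using mergeGo.induct a b with
  | case1 i j h hgt ih =>
      rw [mergeGo, if_pos h, if_pos hgt, ih]
      rw [greaterB_eq, List.drop_eq_getElem_cons h.1, List.drop_eq_getElem_cons h.2] at hgt
      rw [List.drop_eq_getElem_cons h.1, List.drop_eq_getElem_cons h.2,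
        List.getD_eq_getElem a 0 h.1, mergeA, if_pos hgt]
  | case2 i j h hgt ih =>
      rw [mergeGo, if_pos h, if_neg hgt, ih]
      rw [greaterB_eq, List.drop_eq_getElem_cons h.1, List.drop_eq_getElem_cons h.2] at hgt
      rw [List.drop_eq_getElem_cons h.1, List.drop_eq_getElem_cons h.2,
        List.getD_eq_getElem b 0 h.2, mergeA, if_neg (by simpa using hgt)]
  | case3 i j h =>
      rw [mergeGo, if_neg h]
      by_cases hi : i < a.length
      · have hj : b.length ≤ j := by omega
        rw [List.drop_eq_nil_of_le hj, List.drop_eq_getElem_cons hi, mergeA]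
        simp
      · rw [List.drop_eq_nil_of_le (by omega)]
        simp [mergeA]

theorem outer_fold (nums1 nums2 : List Int) (k : Int) (L : List Int) (r : List Int)
    (hL : ∀ i ∈ L, 0 ≤ i ∧ i ≤ k) :
    L.foldl (fun res i =>
      if i ≤ (nums1.length : Int) ∧ k - i ≤ (nums2.length : Int) then
        let t := mergeA (calcA nums1 i) (calcA nums2 (k - i))
        if gtList t res then t else res
      else res) r
    = (L.filterMap (fun i =>
        if i ≤ (nums1.length : Int) ∧ k - i ≤ (nums2.length : Int) then
          some (mergeGo (pickB nums1 i) (pickB nums2 (k - i)) 0 0)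
        else none)).foldl (fun res t => if gtList t res then t else res) r := by
  induction L generalizing r with
  | nil => simp
  | cons i L ih =>
      have hi := hL i (by simp)
      have hL' : ∀ x ∈ L, 0 ≤ x ∧ x ≤ k := fun x hx => hL x (by simp [hx])
      by_cases hg : i ≤ (nums1.length : Int) ∧ k - i ≤ (nums2.length : Int)
      · have ht : mergeGo (pickB nums1 i) (pickB nums2 (k - i)) 0 0 =
            mergeA (calcA nums1 i) (calcA nums2 (k - i)) := by
          rw [mergeGo_eq]
          simp only [List.drop_zero]
          rw [calcA_eq_pickB _ _ hi.1 hg.1, calcA_eq_pickB _ _ (by omega) (by omega)]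
        simp only [List.foldl_cons, List.filterMap_cons, if_pos hg, ht]
        exact ih _ hL'
      · simp only [List.foldl_cons, List.filterMap_cons, if_neg hg]
        exact ih _ hL'

theorem maxfold (c : List (List Int)) :
    c.foldl (fun r t => if gtList t r then t else r) [] =
      (match c with
       | [] => ([] : List Int)
       | h :: t => t.foldl (fun r x => if gtList x r then x else r) h) := by
  cases c with
  | nil => rfl
  | cons h t =>
      simp only [List.foldl_cons]
      congr 1
      cases h with
      | nil => simp [gtList]
      | cons y ys => simp [gtList]

-- ===== VERDICT (by name: the statement is the Claim_ definition above) =====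
theorem maxNumber_spec : Claim_equal_maxNumber := by
  intro nums1 nums2 k _
  show maxNumber nums1 nums2 k = maxNumber_alt nums1 nums2 k
  rw [maxNumber, maxNumber_alt]
  rw [outer_fold nums1 nums2 k _ []
    (fun i hi => by have := PySem.List.mem_pyRange_one.mp hi; omega)]
  exact maxfold _
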